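-- pv_equiv track=rewrite | github.com/Z-Wave-Me/RadioTools | common/zme_aux.py | zme_costruct_int
-- ===== SOURCE A (Python) =====
-- def zme_costruct_int(arr, n, inv = True):
--     val =0
--     for i in range(n):
--         val <<= 8
--         indx = i
--         if inv:
--             indx = n-1-i
--         if (indx < len(arr)) and (indx >= 0):
--             val += arr[indx]
--     return val
-- ===== SOURCE B (Python) =====
-- def zme_costruct_int(arr, n, inv = True):
--     m = min(n, len(arr))
--     if inv:
--         return sum(arr[j] * 256 ** j for j in range(m))
--     return sum(arr[i] * 256 ** (n - 1 - i) for i in range(m))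
-- ===== Notes on version B (the rewrite author's own statement) =====
-- stated objective: alternative
-- what changed: Replaced A's Horner loop (running val <<= 8 with a per-iteration bounds-guarded add) by a guard-free closed positional-weight sum over range(min(n, len(arr))), with the index reversal absorbed into the weight 256**j.
import Mathlib
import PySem

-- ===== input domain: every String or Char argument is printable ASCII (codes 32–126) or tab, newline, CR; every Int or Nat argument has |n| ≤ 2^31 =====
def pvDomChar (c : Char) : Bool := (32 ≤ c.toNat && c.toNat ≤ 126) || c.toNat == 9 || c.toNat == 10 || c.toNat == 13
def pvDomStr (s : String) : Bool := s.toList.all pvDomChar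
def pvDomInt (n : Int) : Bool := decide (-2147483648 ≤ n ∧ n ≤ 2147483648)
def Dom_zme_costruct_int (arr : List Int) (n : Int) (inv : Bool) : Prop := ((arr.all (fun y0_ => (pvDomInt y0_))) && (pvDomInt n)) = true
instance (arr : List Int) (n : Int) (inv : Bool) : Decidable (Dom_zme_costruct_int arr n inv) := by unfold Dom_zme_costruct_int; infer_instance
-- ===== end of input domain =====

-- B replaces A's Horner-style running shift with a direct positional-weight sum (closed decomposition, same cost).

-- ===== PORT A =====
-- literal transliteration of A's Horner loop over range(n)
def zme_costruct_int (arr : List Int) (n : Int) (inv : Bool) : Int :=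
  (PySem.List.pyRange 0 n 1).foldl (fun val i =>
    let val := val * 256
    let indx := if inv then n - 1 - i else i
    if indx < (arr.length : Int) ∧ 0 ≤ indx then val + PySem.List.pyGetD arr indx 0
    else val) 0

-- ===== PORT B =====
-- literal transliteration of B: m = min(n, len(arr)); positional-weight sums
def zme_costruct_int_alt (arr : List Int) (n : Int) (inv : Bool) : Int :=
  let m := min n (arr.length : Int)
  if inv then
    ((PySem.List.pyRange 0 m 1).map (fun j => PySem.List.pyGetD arr j 0 * 256 ^ j.toNat)).sum
  else
    ((PySem.List.pyRange 0 m 1).map (fun i => PySem.List.pyGetD arr i 0 * 256 ^ (n - 1 - i).toNat)).sum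

-- ===== PRECONDITION & SPEC =====
def Spec_zme_costruct_int (arr : List Int) (n : Int) (inv : Bool) (out : Int) : Prop := out = zme_costruct_int_alt arr n inv
instance (arr : List Int) (n : Int) (inv : Bool) (out : Int) : Decidable (Spec_zme_costruct_int arr n inv out) := by unfold Spec_zme_costruct_int; infer_instance

-- ===== CLAIM (what is proved, stated in full; the proofs are below) =====
def Claim_equal_zme_costruct_int : Prop := ∀ (arr : List Int) (n : Int) (inv : Bool), Dom_zme_costruct_int arr n inv → Spec_zme_costruct_int arr n inv (zme_costruct_int arr n inv)

-- ===== LEMMAS AND PROOFS =====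

theorem horner_eq_sum (f : ℕ → ℤ) (k : ℕ) :
    (List.range k).foldl (fun v i => v * 256 + f i) 0
      = ∑ i ∈ Finset.range k, f i * 256 ^ (k - 1 - i) := by
  induction k with
  | zero => simp
  | succ k ih =>
    rw [List.range_succ, List.foldl_append, Finset.sum_range_succ]
    simp only [List.foldl_cons, List.foldl_nil, ih]
    rw [Finset.sum_mul]
    have hc : ∀ i ∈ Finset.range k,
        f i * 256 ^ (k - 1 - i) * 256 = f i * 256 ^ (k + 1 - 1 - i) := by
      intro i hi
      rw [Finset.mem_range] at hi
      have : k + 1 - 1 - i = (k - 1 - i) + 1 := by omega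
      rw [this, pow_succ]; ring
    rw [Finset.sum_congr rfl hc]
    have : k + 1 - 1 - k = 0 := by omega
    rw [this]; ring

theorem sum_ite_lt (t : ℕ → ℤ) (N L : ℕ) :
    ∑ i ∈ Finset.range N, (if i < L then t i else 0)
      = ∑ i ∈ Finset.range (min N L), t i := by
  have hsub : Finset.range (min N L) ⊆ Finset.range N := by
    intro x hx; rw [Finset.mem_range] at *; omega
  rw [← Finset.sum_subset hsub
      (by intro x hx hnx; rw [Finset.mem_range] at hx; rw [Finset.mem_range] at hnx
          rw [if_neg]; omega)]
  refine Finset.sum_congr rfl ?_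
  intro i hi
  rw [Finset.mem_range] at hi
  rw [if_pos]; omega

theorem sum_map_range (f : ℕ → ℤ) (n : ℕ) : ((List.range n).map f).sum = ∑ i ∈ Finset.range n, f i := by
  induction n with
  | zero => simp
  | succ k ih => rw [List.range_succ, Finset.sum_range_succ]; simp [ih]

theorem zme_costruct_int_eq_alt (arr : List Int) (n : Int) (inv : Bool) :
    zme_costruct_int arr n inv = zme_costruct_int_alt arr n inv := by
  unfold zme_costruct_int zme_costruct_int_alt
  have hm : (min n (arr.length : Int)).toNat = min n.toNat arr.length := by
    rcases le_total n (arr.length : Int) with h | h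
    · rw [min_eq_left h]; omega
    · rw [min_eq_right h]; omega
  simp only [PySem.List.pyRange_one, Int.sub_zero, List.foldl_map, List.map_map, zero_add,
    Function.comp_def, hm]
  rw [sum_map_range]
  have hbody : (fun (val : ℤ) (k : ℕ) =>
      (fun val i =>
        let val := val * 256
        let indx := if inv then n - 1 - i else i
        if indx < (arr.length : Int) ∧ 0 ≤ indx then val + PySem.List.pyGetD arr indx 0
        else val) val (k : Int))
      = fun (val : ℤ) (k : ℕ) => val * 256 +
          (if (if inv then n - 1 - (k:Int) else (k:Int)) < (arr.length : Int) ∧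
              0 ≤ (if inv then n - 1 - (k:Int) else (k:Int))
           then PySem.List.pyGetD arr (if inv then n - 1 - (k:Int) else (k:Int)) 0 else 0) := by
    funext val k
    simp only []
    split_ifs <;> ring
  rw [hbody, horner_eq_sum]
  cases inv with
  | false =>
    simp only [Bool.false_eq_true, if_false]
    rw [sum_map_range]
    simp only [PySem.List.pyGetD_natCast, Nat.cast_nonneg, and_true, Nat.cast_lt, ite_mul, zero_mul]
    rw [sum_ite_lt (fun x => arr.getD x 0 * 256 ^ (n.toNat - 1 - x)) n.toNat arr.length]
    refine Finset.sum_congr rfl ?_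
    intro i hi
    rw [Finset.mem_range] at hi
    have : (n - 1 - (i:Int)).toNat = n.toNat - 1 - i := by omega
    rw [this]
  | true =>
    simp only [reduceIte]
    have h1 : ∀ x ∈ Finset.range n.toNat,
        (if n - 1 - (x:Int) < (arr.length:Int) ∧ 0 ≤ n - 1 - (x:Int) then PySem.List.pyGetD arr (n - 1 - (x:Int)) 0 else 0) * 256 ^ (n.toNat - 1 - x)
        = (if n.toNat - 1 - x < arr.length then arr.getD (n.toNat - 1 - x) 0 else 0) * 256 ^ (n.toNat - 1 - x) := by
      intro x hx
      rw [Finset.mem_range] at hx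
      have hc : n - 1 - (x:Int) = ((n.toNat - 1 - x : ℕ) : ℤ) := by omega
      rw [hc]
      simp [Nat.cast_lt]
    rw [Finset.sum_congr rfl h1,
      Finset.sum_range_reflect (fun j => (if j < arr.length then arr.getD j 0 else 0) * 256 ^ j) n.toNat]
    simp only [ite_mul, zero_mul]
    rw [sum_ite_lt (fun j => arr.getD j 0 * 256 ^ j) n.toNat arr.length]
    refine Finset.sum_congr rfl ?_
    intro i hi
    simp

-- ===== VERDICT (by name: the statement is the Claim_ definition above) =====
theorem zme_costruct_int_spec : Claim_equal_zme_costruct_int := by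
  intro arr n inv _
  unfold Spec_zme_costruct_int
  exact zme_costruct_int_eq_alt arr n inv
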